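-- pv_equiv track=rewrite | github.com/QuintessenceCoding/Turiya | sns2f_framework/reasoning/concept_miner.py | _cluster_synonyms
-- ===== SOURCE A (Python) =====
-- from collections import defaultdict
-- from typing import List, Any
--
-- def _cluster_synonyms(subjects: List[str]) -> dict:
--     """
--     Groups subjects that are likely the same entity.
--     Logic: If 'Turing' is a substring of 'Alan Turing', group them.
--     """
--     clusters = defaultdict(list)
--     sorted_subs = sorted(subjects, key=len, reverse=True) # Longest first
--
--     assigned = set()
--
--     for s1 in sorted_subs:
--         if s1 in assigned: continue
--
--         # Start a new cluster
--         clusters[s1].append(s1)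
--         assigned.add(s1)
--
--         # Find smaller substrings
--         for s2 in sorted_subs:
--             if s2 in assigned: continue
--
--             # Check overlap (Simple containment)
--             # e.g. "Turing" in "Alan Turing"
--             if s2 in s1 or s1 in s2:
--                 clusters[s1].append(s2)
--                 assigned.add(s2)
--
--     return clusters
-- ===== SOURCE B (Python) =====
-- def _cluster_synonyms(subjects):
--     """Single pass over the length-sorted list: each string joins the first
--     existing cluster representative that contains it, else starts a cluster."""
--     clusters = {}
--     reps = []
--     seen = set()
--     for s in sorted(subjects, key=len, reverse=True):
--         if s in seen:
--             continue
--         seen.add(s)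
--         for r in reps:
--             if s in r:
--                 clusters[r].append(s)
--                 break
--         else:
--             reps.append(s)
--             clusters[s] = [s]
--     return clusters
-- ===== Notes on version B (the rewrite author's own statement) =====
-- stated objective: faster
-- what changed: A rescans the entire sorted list for every new cluster representative (eagerly claiming all later substrings); B makes a single pass over the sorted list, assigning each string to the first existing representative that contains it (breaking at the first match) or opening a new cluster, so the full-list inner rescans disappear.
import Mathlib
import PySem

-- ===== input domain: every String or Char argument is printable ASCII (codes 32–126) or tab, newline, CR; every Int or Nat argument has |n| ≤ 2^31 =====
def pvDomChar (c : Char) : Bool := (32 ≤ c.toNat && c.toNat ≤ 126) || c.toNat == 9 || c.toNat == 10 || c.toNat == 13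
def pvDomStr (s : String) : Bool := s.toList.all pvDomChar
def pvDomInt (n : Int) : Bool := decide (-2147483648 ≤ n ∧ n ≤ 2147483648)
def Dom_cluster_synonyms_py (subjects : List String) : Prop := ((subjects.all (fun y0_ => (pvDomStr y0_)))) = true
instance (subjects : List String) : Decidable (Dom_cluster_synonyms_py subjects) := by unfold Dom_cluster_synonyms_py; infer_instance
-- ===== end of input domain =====

-- B is a single pass over the length-sorted list (each string joins the first existing
-- cluster representative containing it, else starts a cluster) instead of A's nested
-- rescans of the whole list for every new representative; return value equivalence.

-- ===== PORT A =====
-- inner 'for s2 in sorted_subs' loop body of A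
def pvInnerStep (s1 : String) (st : PySem.Dict String (List String) × PySem.Set String)
    (s2 : String) : PySem.Dict String (List String) × PySem.Set String :=
  if PySem.Set.contains st.2 s2 then st
  else if PySem.Str.isIn s2 s1 || PySem.Str.isIn s1 s2 then
    (st.1.insert s1 (st.1.getD s1 [] ++ [s2]), PySem.Set.add st.2 s2)
  else st

-- outer 'for s1 in sorted_subs' loop body of A
def pvOuterStep (sorted_subs : List String)
    (st : PySem.Dict String (List String) × PySem.Set String)
    (s1 : String) : PySem.Dict String (List String) × PySem.Set String :=
  if PySem.Set.contains st.2 s1 then st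
  else
    let cl := st.1.insert s1 (st.1.getD s1 [] ++ [s1])
    let asg := PySem.Set.add st.2 s1
    sorted_subs.foldl (pvInnerStep s1) (cl, asg)

def cluster_synonyms_py (subjects : List String) : List (String × List String) :=
  let sorted_subs := PySem.List.sorted subjects (fun s => PySem.Str.len s) true
  (sorted_subs.foldl (pvOuterStep sorted_subs) (PySem.Dict.empty, PySem.Set.empty)).1.items

-- ===== PORT B =====
-- 'for r in reps: if s in r: … break / else: …' — first rep containing s
def pvFirstRep (s : String) : List String → Option String
  | [] => none
  | r :: t => if PySem.Str.isIn s r then some r else pvFirstRep s t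

-- loop body of B's single pass
def pvStepB (st : PySem.Dict String (List String) × List String × PySem.Set String)
    (s : String) : PySem.Dict String (List String) × List String × PySem.Set String :=
  if PySem.Set.contains st.2.2 s then st
  else
    let seen := PySem.Set.add st.2.2 s
    match pvFirstRep s st.2.1 with
    | some r => (st.1.insert r (st.1.getD r [] ++ [s]), st.2.1, seen)
    | none => (st.1.insert s [s], st.2.1 ++ [s], seen)

def cluster_synonyms_py_alt (subjects : List String) : List (String × List String) :=
  ((PySem.List.sorted subjects (fun s => PySem.Str.len s) true).foldl pvStepB
    (PySem.Dict.empty, [], PySem.Set.empty)).1.items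

-- ===== PRECONDITION & SPEC =====
def Spec_cluster_synonyms_py (subjects : List String) (out : List (String × List String)) : Prop := out = cluster_synonyms_py_alt subjects
instance (subjects : List String) (out : List (String × List String)) : Decidable (Spec_cluster_synonyms_py subjects out) := by unfold Spec_cluster_synonyms_py; infer_instance

-- ===== CLAIM (what is proved, stated in full; the proofs are below) =====
def Claim_equal_cluster_synonyms_py : Prop := ∀ (subjects : List String), Dom_cluster_synonyms_py subjects → Spec_cluster_synonyms_py subjects (cluster_synonyms_py subjects)

-- ===== LEMMAS AND PROOFS =====

-- ordered dedup of t relative to an already-seen set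
def pvDedup (seen : PySem.Set String) : List String → List String
  | [] => []
  | x :: t => if PySem.Set.contains seen x then pvDedup seen t
              else x :: pvDedup (PySem.Set.add seen x) t

-- the members of the suffix t that A has already (eagerly) handed to representative r
def pvClaims (reps : List String) (seen : PySem.Set String) (t : List String) (r : String) : List String :=
  (pvDedup seen t).filter (fun x => pvFirstRep x reps == some r)

-- elements A's inner loop (for rep s, over suffix t, assigned set asg) appends to cluster s
def pvInnerClaims (s : String) (asg : PySem.Set String) : List String → List String
  | [] => []
  | x :: t => if PySem.Set.contains asg x then pvInnerClaims s asg t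
              else if PySem.Str.isIn x s || PySem.Str.isIn s x then
                x :: pvInnerClaims s (PySem.Set.add asg x) t
              else pvInnerClaims s asg t

-- the assigned set after that same inner loop
def pvInnerAsg (s : String) (asg : PySem.Set String) : List String → PySem.Set String
  | [] => asg
  | x :: t => if PySem.Set.contains asg x then pvInnerAsg s asg t
              else if PySem.Str.isIn x s || PySem.Str.isIn s x then
                pvInnerAsg s (PySem.Set.add asg x) t
              else pvInnerAsg s asg t

lemma pvSet_contains_add (S : PySem.Set String) (x y : String) :
    PySem.Set.contains (PySem.Set.add S x) y = (PySem.Set.contains S y || y == x) := by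
  simp only [PySem.Set.contains, PySem.Set.add, List.contains_eq_mem]
  split_ifs with h
  · cases hyx : y == x
    · simp
    · have hy : y = x := eq_of_beq hyx
      subst hy
      simp_all
  · cases hyx : y == x
    · have hy : y ≠ x := by simpa using hyx
      simp [List.mem_append, hy]
    · have hy : y = x := eq_of_beq hyx
      subst hy
      simp [List.mem_append]

lemma pvFirstRep_mem {x r : String} {reps : List String} (h : pvFirstRep x reps = some r) :
    r ∈ reps := by
  induction reps with
  | nil => simp [pvFirstRep] at h
  | cons a t ih =>
    rw [pvFirstRep] at h
    split at h
    · simp [Option.some_inj.mp h]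
    · simp [ih h]

lemma pvFirstRep_append (x s : String) (reps : List String) :
    pvFirstRep x (reps ++ [s]) =
      match pvFirstRep x reps with
      | some r => some r
      | none => if PySem.Str.isIn x s then some s else none := by
  induction reps with
  | nil => simp [pvFirstRep]
  | cons a t ih =>
    rw [List.cons_append, pvFirstRep, pvFirstRep]
    split
    · rfl
    · exact ih

-- 'x in s and len s ≤ len x' forces x = s
lemma pvIsIn_eq_of_le {s x : String} (h : PySem.Str.isIn s x = true)
    (hl : PySem.Str.len x ≤ PySem.Str.len s) : x = s := by
  rw [PySem.Str.isIn_iff_infix] at h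
  rw [PySem.Str.len_eq, PySem.Str.len_eq, Nat.cast_le] at hl
  have := h.length_le
  have he := h.eq_of_length (by omega)
  exact (String.toList_inj.mp he).symm

-- the inner loop skips a prefix that is entirely assigned
lemma pvInner_skip_prefix (s : String) (p : List String) :
    ∀ (t : List String) (st : PySem.Dict String (List String) × PySem.Set String),
    (∀ x ∈ p, PySem.Set.contains st.2 x = true) →
    (p ++ t).foldl (pvInnerStep s) st = t.foldl (pvInnerStep s) st := by
  induction p with
  | nil => intro t st _; rfl
  | cons a p' ih =>
    intro t st hp
    rw [List.cons_append, List.foldl_cons]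
    have ha : pvInnerStep s st a = st := by
      simp only [pvInnerStep]
      rw [if_pos (hp a (by simp))]
    rw [ha]
    exact ih t st (fun x hx => hp x (by simp [hx]))

-- a no-op reinsert of an existing key
lemma pvInsert_getD_self {d : PySem.Dict String (List String)} {k : String}
    (hc : d.contains k = true) (hnd : d.keys.Nodup) :
    d.insert k (d.getD k []) = d := by
  apply PySem.Dict.ext
  rw [PySem.Dict.items_insert_of_contains d _ hc]
  conv_rhs => rw [← List.map_id d.items]
  apply List.map_congr_left
  intro p hp
  cases hpk : p.1 == k
  · simp
  · have hk : p.1 = k := eq_of_beq hpk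
    have hmem : (k, p.2) ∈ d.items := by rwa [← hk]
    have := PySem.Dict.getD_of_mem_items d hmem hnd []
    simp only [id_eq, if_true]
    rw [this, ← hk]

-- characterisation of A's inner loop
lemma pvInner_eq (s : String) :
    ∀ (t : List String) (cl : PySem.Dict String (List String)) (asg : PySem.Set String),
    cl.contains s = true → cl.keys.Nodup →
    t.foldl (pvInnerStep s) (cl, asg) =
      (cl.insert s (cl.getD s [] ++ pvInnerClaims s asg t), pvInnerAsg s asg t) := by
  intro t
  induction t with
  | nil =>
    intro cl asg hc hnd
    simp only [List.foldl_nil, pvInnerClaims, pvInnerAsg, List.append_nil]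
    rw [pvInsert_getD_self hc hnd]
  | cons x t ih =>
    intro cl asg hc hnd
    rw [List.foldl_cons]
    simp only [pvInnerClaims, pvInnerAsg]
    by_cases h1 : PySem.Set.contains asg x = true
    · have hstep : pvInnerStep s (cl, asg) x = (cl, asg) := by
        simp only [pvInnerStep]; rw [if_pos h1]
      rw [hstep, if_pos h1, if_pos h1, ih cl asg hc hnd]
    · rw [if_neg h1, if_neg h1]
      by_cases h2 : (PySem.Str.isIn x s || PySem.Str.isIn s x) = true
      · have hstep : pvInnerStep s (cl, asg) x
            = (cl.insert s (cl.getD s [] ++ [x]), PySem.Set.add asg x) := by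
          simp only [pvInnerStep]; rw [if_neg h1, if_pos h2]
        rw [hstep, if_pos h2, if_pos h2,
            ih _ _ (PySem.Dict.contains_insert_self cl s _)
              (by rw [PySem.Dict.keys_insert_of_contains cl _ hc]; exact hnd),
            PySem.Dict.getD_insert_self, PySem.Dict.insert_insert_self]
        rw [List.append_assoc]
        rfl
      · have hstep : pvInnerStep s (cl, asg) x = (cl, asg) := by
          simp only [pvInnerStep]; rw [if_neg h1, if_neg h2]
        rw [hstep, if_neg h2, if_neg h2, ih cl asg hc hnd]

-- membership in the assigned set after the inner loop
lemma pvInnerAsg_contains (s : String) :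
    ∀ (t : List String) (asg : PySem.Set String) (y : String),
    PySem.Set.contains (pvInnerAsg s asg t) y
      = (PySem.Set.contains asg y ||
         (t.contains y && (PySem.Str.isIn y s || PySem.Str.isIn s y))) := by
  intro t
  induction t with
  | nil => intro asg y; simp [pvInnerAsg]
  | cons x t ih =>
    intro asg y
    simp only [pvInnerAsg]
    by_cases h1 : PySem.Set.contains asg x = true
    · rw [if_pos h1, ih]
      by_cases hyx : y = x
      · subst hyx; simp_all [PySem.Set.contains]
      · simp_all
    · rw [if_neg h1]
      by_cases h2 : (PySem.Str.isIn x s || PySem.Str.isIn s x) = true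
      · rw [if_pos h2, ih, pvSet_contains_add]
        by_cases hyx : y = x
        · subst hyx; simp_all [PySem.Str.isIn]
        · have hb : (y == x) = false := by simpa using hyx
          simp [hb, hyx]
      · rw [if_neg h2, ih]
        rw [Bool.not_eq_true] at h2
        by_cases hyx : y = x
        · subst hyx; simp_all [PySem.Str.isIn]
        · simp_all

-- the inner loop's claims are the dedup-then-filter form
lemma pvInnerClaims_eq (s : String) (reps' : List String) :
    ∀ (t : List String) (asg S : PySem.Set String),
    (∀ x ∈ t, ((!PySem.Set.contains asg x) && (PySem.Str.isIn x s || PySem.Str.isIn s x))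
             = ((!PySem.Set.contains S x) && (pvFirstRep x reps' == some s))) →
    pvInnerClaims s asg t = (pvDedup S t).filter (fun x => pvFirstRep x reps' == some s) := by
  intro t
  induction t with
  | nil => intro asg S _; simp [pvInnerClaims, pvDedup]
  | cons x t ih =>
    intro asg S hK
    have hKx := hK x (by simp)
    simp only [pvInnerClaims, pvDedup]
    by_cases hS : PySem.Set.contains S x = true
    · rw [if_pos hS]
      by_cases hA : PySem.Set.contains asg x = true
      · rw [if_pos hA]
        exact ih asg S (fun y hy => hK y (by simp [hy]))
      · have hA' : PySem.Set.contains asg x = false := by rwa [Bool.not_eq_true] at hA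
        have hm : (PySem.Str.isIn x s || PySem.Str.isIn s x) = false := by
          rw [hA', hS] at hKx; simpa using hKx
        rw [if_neg hA, if_neg (by rw [hm]; exact Bool.false_ne_true)]
        exact ih asg S (fun y hy => hK y (by simp [hy]))
    · have hS' : PySem.Set.contains S x = false := by rwa [Bool.not_eq_true] at hS
      rw [if_neg hS]
      by_cases hA : PySem.Set.contains asg x = true
      · rw [if_pos hA]
        have hf : (pvFirstRep x reps' == some s) = false := by
          rw [hA, hS'] at hKx; simpa using hKx.symm
        rw [List.filter_cons_of_neg (by simp [hf])]
        refine ih asg (PySem.Set.add S x) (fun y hy => ?_)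
        rw [pvSet_contains_add]
        by_cases hyx : y = x
        · subst hyx; rw [hA, beq_self_eq_true, Bool.or_true]; simp
        · have hb : (y == x) = false := by simpa using hyx
          rw [hb, Bool.or_false]
          exact hK y (by simp [hy])
      · have hA' : PySem.Set.contains asg x = false := by rwa [Bool.not_eq_true] at hA
        by_cases hm : (PySem.Str.isIn x s || PySem.Str.isIn s x) = true
        · have hf : (pvFirstRep x reps' == some s) = true := by
            rw [hA', hS', hm] at hKx; simpa using hKx.symm
          rw [if_neg hA, if_pos hm, List.filter_cons_of_pos (by exact hf)]
          refine congrArg (x :: ·) (ih (PySem.Set.add asg x) (PySem.Set.add S x) (fun y hy => ?_))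
          rw [pvSet_contains_add, pvSet_contains_add]
          by_cases hyx : y = x
          · subst hyx; rw [beq_self_eq_true, Bool.or_true, Bool.or_true]; simp
          · have hb : (y == x) = false := by simpa using hyx
            rw [hb, Bool.or_false, Bool.or_false]
            exact hK y (by simp [hy])
        · have hm' : (PySem.Str.isIn x s || PySem.Str.isIn s x) = false := by
            rwa [Bool.not_eq_true] at hm
          have hf : (pvFirstRep x reps' == some s) = false := by
            rw [hA', hS', hm'] at hKx; simpa using hKx.symm
          rw [if_neg hA, if_neg hm, List.filter_cons_of_neg (by simp [hf])]
          refine ih asg (PySem.Set.add S x) (fun y hy => ?_)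
          rw [pvSet_contains_add]
          by_cases hyx : y = x
          · subst hyx; rw [hm', beq_self_eq_true, Bool.or_true]; simp
          · have hb : (y == x) = false := by simpa using hyx
            rw [hb, Bool.or_false]
            exact hK y (by simp [hy])

-- the simulation: A's nested loops over the suffix t agree with B's single pass
lemma pvMain :
    ∀ (t p : List String) (clA : PySem.Dict String (List String)) (asg : PySem.Set String)
      (clB : PySem.Dict String (List String)) (reps : List String) (seen : PySem.Set String),
    (p ++ t).Pairwise (fun a b => PySem.Str.len b ≤ PySem.Str.len a) →
    (∀ r ∈ reps, r ∈ p) →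
    (∀ x ∈ p, PySem.Set.contains seen x = true) →
    (∀ x, PySem.Set.contains asg x
        = (PySem.Set.contains seen x || (t.contains x && (pvFirstRep x reps).isSome))) →
    (∀ r ∈ reps, PySem.Set.contains seen r = true) →
    clB.items.map Prod.fst = reps →
    reps.Nodup →
    clA.items = clB.items.map (fun rv => (rv.1, rv.2 ++ pvClaims reps seen t rv.1)) →
    (t.foldl (pvOuterStep (p ++ t)) (clA, asg)).1.items
      = (t.foldl pvStepB (clB, reps, seen)).1.items := by
  intro t
  induction t with
  | nil =>
    intro p clA asg clB reps seen _ _ _ _ _ _ _ hclA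
    simp only [List.foldl_nil]
    rw [hclA]
    simp [pvClaims, pvDedup]
  | cons s t' ih =>
    intro p clA asg clB reps seen hsort hrepp hpseen hasg hrepseen hkeys hnd hclA
    have happ : p ++ s :: t' = (p ++ [s]) ++ t' := by simp
    have hndk : clB.keys.Nodup := by
      have : clB.keys = reps := hkeys
      rw [this]; exact hnd
    have hst' : ∀ x ∈ t', PySem.Str.len x ≤ PySem.Str.len s := by
      have h2 := (List.pairwise_append.mp hsort).2.1
      exact fun x hx => List.rel_of_pairwise_cons h2 hx
    have hsort' : ((p ++ [s]) ++ t').Pairwise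
        (fun a b => PySem.Str.len b ≤ PySem.Str.len a) := by rwa [← happ]
    rw [List.foldl_cons, List.foldl_cons]
    by_cases hseen : PySem.Set.contains seen s = true
    · -- s was already placed in a cluster: both sides skip it
      have hasgs : PySem.Set.contains asg s = true := by rw [hasg s, hseen]; simp
      have hA : pvOuterStep (p ++ s :: t') (clA, asg) s = (clA, asg) := by
        simp only [pvOuterStep]; rw [if_pos hasgs]
      have hB : pvStepB (clB, reps, seen) s = (clB, reps, seen) := by
        simp only [pvStepB]; rw [if_pos hseen]
      rw [hA, hB, happ]
      refine ih (p ++ [s]) clA asg clB reps seen hsort'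
        (fun r hr => by simp [hrepp r hr])
        (fun x hx => by
          rcases List.mem_append.mp hx with h | h
          · exact hpseen x h
          · simp at h; subst h; exact hseen)
        (fun x => ?_) hrepseen hkeys hnd ?_
      · rw [hasg x]
        by_cases hxs : x = s
        · subst hxs; rw [hseen]; simp
        · simp [hxs]
      · rw [hclA]
        have hsm : s ∈ seen := by
          simpa [PySem.Set.contains, List.contains_eq_mem] using hseen
        simp [pvClaims, pvDedup, hsm]
    · have hseen' : PySem.Set.contains seen s = false := by
        rwa [Bool.not_eq_true] at hseen
      have hsmem : s ∉ reps := fun h => by rw [hrepseen s h] at hseen'; cases hseen'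
      cases hfr : pvFirstRep s reps with
      | some r =>
        -- s joins r's cluster: A had already placed it there, B does it now
        have hrmem : r ∈ reps := pvFirstRep_mem hfr
        have hasgs : PySem.Set.contains asg s = true := by
          rw [hasg s, hfr]; simp
        have hA : pvOuterStep (p ++ s :: t') (clA, asg) s = (clA, asg) := by
          simp only [pvOuterStep]; rw [if_pos hasgs]
        have hB : pvStepB (clB, reps, seen) s
            = (clB.insert r (clB.getD r [] ++ [s]), reps, PySem.Set.add seen s) := by
          simp only [pvStepB]; rw [if_neg hseen, hfr]
        have hcr : clB.contains r = true := by
          rw [PySem.Dict.contains_iff_mem_keys]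
          rw [show clB.keys = reps from hkeys]; exact hrmem
        rw [hA, hB, happ]
        refine ih (p ++ [s]) clA asg
          (clB.insert r (clB.getD r [] ++ [s])) reps (PySem.Set.add seen s) hsort'
          (fun r' hr' => by simp [hrepp r' hr'])
          (fun x hx => by
            rw [pvSet_contains_add]
            rcases List.mem_append.mp hx with h | h
            · rw [hpseen x h]; simp
            · simp at h; subst h; simp)
          (fun x => ?_)
          (fun r' hr' => by rw [pvSet_contains_add, hrepseen r' hr']; simp)
          ?_ hnd ?_
        · rw [hasg x, pvSet_contains_add]
          by_cases hxs : x = s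
          · subst hxs; rw [hfr]; simp
          · have hb : (x == s) = false := by simpa using hxs
            simp [hxs, hb]
        · rw [PySem.Dict.items_insert_of_contains _ _ hcr, List.map_map]
          rw [← hkeys]
          apply List.map_congr_left
          intro e _
          cases hek : e.1 == r
          · simp [Function.comp, hek]
          · have : e.1 = r := eq_of_beq hek
            simp [Function.comp, this]
        · rw [hclA, PySem.Dict.items_insert_of_contains _ _ hcr, List.map_map]
          apply List.map_congr_left
          intro e he
          have hkmem : e.1 ∈ reps := by
            rw [← hkeys]; exact List.mem_map_of_mem he
          have hclaims : pvClaims reps seen (s :: t') e.1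
              = if e.1 = r then s :: pvClaims reps (PySem.Set.add seen s) t' e.1
                else pvClaims reps (PySem.Set.add seen s) t' e.1 := by
            simp only [pvClaims, pvDedup, hseen']
            rw [if_neg (by simp)]
            rw [List.filter_cons]
            by_cases her : e.1 = r
            · subst her; rw [hfr]; simp
            · rw [hfr]
              have : (some r == some e.1) = false := by
                simpa using (Ne.symm her)
              simp [this, her]
          cases her : decide (e.1 = r) with
          | true =>
            have her' : e.1 = r := of_decide_eq_true her
            have hmem : (r, e.2) ∈ clB.items := by rw [← her']; exact he
            have hgd : clB.getD r [] = e.2 := PySem.Dict.getD_of_mem_items clB hmem hndk []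
            rw [her'] at hclaims
            simp only [Function.comp, her', beq_self_eq_true, if_true]
            rw [hgd, hclaims, if_pos rfl]
            simp
          | false =>
            have her' : e.1 ≠ r := of_decide_eq_false her
            have hb : (e.1 == r) = false := by simpa using her'
            simp only [Function.comp, hb]
            rw [hclaims, if_neg her']
            simp
      | none =>
        -- s starts a new cluster; A's eager inner scan = B's lazy future claims
        have hasgs : PySem.Set.contains asg s = false := by
          rw [hasg s, hfr, hseen']; simp
        have hkeysA : clA.keys = reps := by
          show clA.items.map Prod.fst = reps
          rw [hclA, List.map_map, ← hkeys]
          apply List.map_congr_left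
          intro e _; rfl
        have hcAs : clA.contains s = false := by
          rw [← Bool.not_eq_true, PySem.Dict.contains_iff_mem_keys, hkeysA]
          exact hsmem
        have hgdA : clA.getD s [] = [] := PySem.Dict.getD_of_not_contains clA [] hcAs
        have hcBs : clB.contains s = false := by
          rw [← Bool.not_eq_true, PySem.Dict.contains_iff_mem_keys]
          rw [show clB.keys = reps from hkeys]; exact hsmem
        have hA : pvOuterStep (p ++ s :: t') (clA, asg) s
            = t'.foldl (pvInnerStep s)
                (clA.insert s ([] ++ [s]), PySem.Set.add asg s) := by
          simp only [pvOuterStep]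
          rw [if_neg (by rw [hasgs]; exact Bool.false_ne_true), hgdA, happ]
          exact pvInner_skip_prefix s (p ++ [s]) t' _
            (fun x hx => by
              show PySem.Set.contains (PySem.Set.add asg s) x = true
              rw [pvSet_contains_add]
              rcases List.mem_append.mp hx with h | h
              · rw [hasg x, hpseen x h]; simp
              · simp at h; subst h; simp)
        have hndA : (clA.insert s ([] ++ [s])).keys.Nodup := by
          rw [PySem.Dict.keys_insert_of_not_contains clA _ hcAs, hkeysA]
          simp only [List.nodup_append, List.nodup_singleton, true_and]
          exact ⟨hnd, fun a ha b hb h =>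
            hsmem (by simp only [List.mem_singleton] at hb; rw [h, hb] at ha; exact ha)⟩
        have hinner := pvInner_eq s t' (clA.insert s ([] ++ [s])) (PySem.Set.add asg s)
          (PySem.Dict.contains_insert_self clA s _) hndA
        rw [hA, hinner, PySem.Dict.getD_insert_self, PySem.Dict.insert_insert_self]
        have hB : pvStepB (clB, reps, seen) s
            = (clB.insert s [s], reps ++ [s], PySem.Set.add seen s) := by
          simp only [pvStepB]; rw [if_neg hseen, hfr]
        rw [hB, happ]
        -- claims of the new rep s: A's inner loop = the dedup-filter form
        have hsxf : ∀ x ∈ t', x ≠ s → PySem.Str.isIn s x = false := by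
          intro x hx hxs
          cases h : PySem.Str.isIn s x
          · rfl
          · exact absurd (pvIsIn_eq_of_le h (hst' x hx)) hxs
        have hIC : pvInnerClaims s (PySem.Set.add asg s) t'
            = (pvDedup (PySem.Set.add seen s) t').filter
                (fun x => pvFirstRep x (reps ++ [s]) == some s) := by
          apply pvInnerClaims_eq
          intro x hx
          rw [pvSet_contains_add, pvSet_contains_add]
          by_cases hxs : x = s
          · subst hxs; simp
          · have hb : (x == s) = false := by simpa using hxs
            rw [hb, Bool.or_false, Bool.or_false, hasg x]
            have hsc : (s :: t').contains x = true := by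
              simp [List.contains_eq_mem, hx]
            rw [hsc, Bool.true_and, pvFirstRep_append]
            cases hF : pvFirstRep x reps with
            | some r'' =>
              have : r'' ≠ s := fun h => hsmem (h ▸ pvFirstRep_mem hF)
              have hbr : (some r'' == some s) = false := by simpa using this
              simp [hbr]
            | none =>
              simp only [Option.isSome_none, Bool.or_false]
              cases hin : PySem.Str.isIn x s
              · rw [hsxf x hx hxs]
                simp
              · simp
        -- A's prefix clusters carry the same future claims as after B's step
        have hclaims_shift : ∀ k, k ∈ reps →
            pvClaims reps seen (s :: t') k
              = pvClaims (reps ++ [s]) (PySem.Set.add seen s) t' k := by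
          intro k hk
          have hks : s ≠ k := fun h => hsmem (h ▸ hk)
          simp only [pvClaims, pvDedup, hseen', Bool.false_eq_true, if_false]
          rw [List.filter_cons]
          have h1 : (pvFirstRep s reps == some k) = false := by rw [hfr]; rfl
          rw [h1]
          simp only [Bool.false_eq_true, if_false]
          apply List.filter_congr
          intro x _
          rw [pvFirstRep_append]
          cases hF : pvFirstRep x reps with
          | some r'' => rfl
          | none =>
            cases hin : PySem.Str.isIn x s
            · simp
            · have : (some s == some k) = false := by simpa using hks
              simp [this]
        refine ih (p ++ [s])
          (clA.insert s ([] ++ [s] ++ pvInnerClaims s (PySem.Set.add asg s) t'))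
          (pvInnerAsg s (PySem.Set.add asg s) t')
          (clB.insert s [s]) (reps ++ [s]) (PySem.Set.add seen s) hsort'
          (fun r' hr' => by
            rcases List.mem_append.mp hr' with h | h
            · exact List.mem_append.mpr (Or.inl (hrepp r' h))
            · exact List.mem_append.mpr (Or.inr h))
          (fun x hx => by
            rw [pvSet_contains_add]
            rcases List.mem_append.mp hx with h | h
            · rw [hpseen x h]; simp
            · simp at h; subst h; simp)
          (fun x => ?_)
          (fun r' hr' => by
            rw [pvSet_contains_add]
            rcases List.mem_append.mp hr' with h | h
            · rw [hrepseen r' h]; simp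
            · simp at h; subst h; simp)
          ?_ (by
            simp only [List.nodup_append, List.nodup_singleton, true_and]
            exact ⟨hnd, fun a ha b hb h =>
            hsmem (by simp only [List.mem_singleton] at hb; rw [h, hb] at ha; exact ha)⟩) ?_
        · -- the assigned set after the inner loop, characterised
          rw [pvInnerAsg_contains, pvSet_contains_add, pvSet_contains_add, hasg x]
          by_cases hxs : x = s
          · subst hxs; simp
          · have hb : (x == s) = false := by simpa using hxs
            rw [hb, Bool.or_false, Bool.or_false]
            by_cases hx : x ∈ t'
            · have hxc : t'.contains x = true := by simp [List.contains_eq_mem, hx]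
              have hsc : (s :: t').contains x = true := by
                simp [List.contains_eq_mem, hx]
              rw [hxc, hsc, Bool.true_and, Bool.true_and, pvFirstRep_append]
              cases hF : pvFirstRep x reps with
              | some r'' => simp
              | none =>
                simp only [Option.isSome_none, Bool.or_false]
                cases hin : PySem.Str.isIn x s
                · rw [hsxf x hx hxs]
                  simp
                · simp
            · have hxc : t'.contains x = false := by simp [List.contains_eq_mem, hx]
              have hsc : (s :: t').contains x = false := by
                simp [List.contains_eq_mem, hx, hxs]
              rw [hxc, hsc]
              simp
        · -- keys after the appending insert
          rw [PySem.Dict.items_insert_of_not_contains clB _ hcBs, List.map_append, hkeys]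
          rfl
        · -- the cluster dict invariant after the step
          rw [PySem.Dict.items_insert_of_not_contains clA _ hcAs,
              PySem.Dict.items_insert_of_not_contains clB _ hcBs,
              List.map_append, hclA]
          congr 1
          · apply List.map_congr_left
            intro e he
            have hkmem : e.1 ∈ reps := by
              rw [← hkeys]; exact List.mem_map_of_mem he
            rw [hclaims_shift e.1 hkmem]
          · rw [hIC]
            rfl

-- ===== VERDICT (by name: the statement is the Claim_ definition above) =====
theorem cluster_synonyms_py_spec : Claim_equal_cluster_synonyms_py := by
  intro subjects _
  unfold Spec_cluster_synonyms_py cluster_synonyms_py cluster_synonyms_py_alt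
  have h := pvMain (PySem.List.sorted subjects (fun s => PySem.Str.len s) true) []
    PySem.Dict.empty PySem.Set.empty PySem.Dict.empty [] PySem.Set.empty
  simp only [List.nil_append] at h
  exact (h (PySem.List.sorted_pairwise_rev subjects _) (by simp) (by simp)
    (by intro x; simp [PySem.Set.contains, pvFirstRep]) (by simp) (by simp [PySem.Dict.empty])
    (by simp) (by simp [PySem.Dict.empty, pvClaims]))
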